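-- pv_equiv track=rewrite | github.com/devwaseem/hyperdjango | hyperdjango/routing/graph.py | _pattern_skeleton
-- ===== SOURCE A (Python) =====
-- def _pattern_skeleton(raw: str) -> str:
--     parts: list[str] = []
--     idx = 0
--     while idx < len(raw):
--         if raw[idx] != "[":
--             parts.append(raw[idx])
--             idx += 1
--             continue
--
--         end = _find_closing_bracket(raw, idx)
--         if end is None:
--             parts.append(raw[idx])
--             idx += 1
--             continue
--         parts.append("[]")
--         idx = end + 1
--
--     return "".join(parts)
--
-- def _find_closing_bracket(text: str, open_index: int) -> int | None:
--     depth = 0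
--     idx = open_index + 1
--     while idx < len(text):
--         ch = text[idx]
--         if ch == "[":
--             depth += 1
--         elif ch == "]":
--             if depth == 0:
--                 return idx
--             depth -= 1
--         idx += 1
--     return None
-- ===== SOURCE B (Python) =====
-- def _pattern_skeleton(raw: str) -> str:
--     # One stack pass: push the current piece buffer at '[', pop at a matching ']'
--     # (discarding the bracketed interior), so unmatched brackets stay literal.
--     stack: list[list[str]] = []
--     buf: list[str] = []
--     for ch in raw:
--         if ch == "[":
--             stack.append(buf)
--             buf = []
--         elif ch == "]" and stack:
--             buf = stack.pop()
--             buf.append("[")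
--             buf.append("]")
--         else:
--             buf.append(ch)
--     out: list[str] = []
--     for b in stack:  # buffers of still-open '[' , bottom first
--         out.extend(b)
--         out.append("[")
--     out.extend(buf)
--     return "".join(out)
-- ===== Notes on version B (the rewrite author's own statement) =====
-- stated objective: faster
-- what changed: A rescans the tail for a matching bracket at every '[' (a nested scan); B makes one left-to-right pass maintaining a stack of piece buffers, popping at a matching ']' and flattening the still-open buffers at the end.
import Mathlib
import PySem

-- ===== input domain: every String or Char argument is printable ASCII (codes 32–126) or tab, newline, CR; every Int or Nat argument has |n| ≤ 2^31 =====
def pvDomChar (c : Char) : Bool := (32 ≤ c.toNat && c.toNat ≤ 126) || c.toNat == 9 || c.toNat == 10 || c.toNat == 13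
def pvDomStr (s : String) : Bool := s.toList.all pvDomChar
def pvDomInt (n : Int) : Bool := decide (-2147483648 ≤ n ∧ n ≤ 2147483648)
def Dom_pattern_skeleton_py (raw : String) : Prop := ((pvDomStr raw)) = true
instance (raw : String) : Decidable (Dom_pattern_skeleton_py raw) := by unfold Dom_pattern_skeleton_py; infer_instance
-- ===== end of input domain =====

-- B replaces A's rescan-per-bracket (quadratic) with a single stack pass; equivalence is total.

-- ===== PORT A =====
-- _find_closing_bracket: the index-based scan is transliterated over the suffix after the
-- opening bracket; Python returns the index `end` and A continues at `end + 1`, which is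
-- exactly the suffix this port returns (none = Python's None).
def pyFindClosing : List Char → Nat → Option (List Char)
  | [], _ => none
  | c :: t, d =>
    if c = '[' then pyFindClosing t (d + 1)
    else if c = ']' then
      if d = 0 then some t else pyFindClosing t (d - 1)
    else pyFindClosing t d

-- termination helper for the outer while loop (idx = end + 1 strictly advances)
lemma pyFindClosing_length : ∀ (l : List Char) (d : Nat) (v : List Char),
    pyFindClosing l d = some v → v.length < l.length := by
  intro l
  induction l with
  | nil => intro d v h; simp [pyFindClosing] at h
  | cons c t ih =>
    intro d v h
    simp only [pyFindClosing] at h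
    split_ifs at h with h1 h2 h3
    · exact Nat.lt_succ_of_lt (ih _ _ h)
    · cases h; simp
    · exact Nat.lt_succ_of_lt (ih _ _ h)
    · exact Nat.lt_succ_of_lt (ih _ _ h)

-- the outer while loop of _pattern_skeleton, with the `parts` accumulator
def pySkelAux : List Char → List (List Char) → List (List Char)
  | [], parts => parts
  | c :: t, parts =>
    if c ≠ '[' then pySkelAux t (parts ++ [[c]])
    else
      match _h : pyFindClosing t 0 with
      | none => pySkelAux t (parts ++ [[c]])
      | some v => pySkelAux v (parts ++ [['[', ']']])
termination_by l _ => l.length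
decreasing_by
  · simp
  · simp
  · exact Nat.lt_succ_of_lt (pyFindClosing_length t 0 v _h)

-- "".join(parts)
def pyJoin (parts : List (List Char)) : List Char :=
  parts.foldl (fun acc p => acc ++ p) []

def pattern_skeleton_py (raw : String) : String :=
  String.ofList (pyJoin (pySkelAux raw.toList []))

-- ===== PORT B =====
-- one fold step of Source B's loop; the Lean stack keeps its top at the head
-- (Python appends/pops at the end)
def altStep (st : List (List Char) × List Char) (ch : Char) : List (List Char) × List Char :=
  if ch = '[' then (st.2 :: st.1, [])
  else if ch = ']' then
    match st.1 with
    | b :: rest => (rest, b ++ ['[', ']'])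
    | [] => (st.1, st.2 ++ [ch])
  else (st.1, st.2 ++ [ch])

-- the final flattening loop over the still-open buffers, bottom first
def altOutFold (stk : List (List Char)) : List Char :=
  stk.foldl (fun out b => out ++ b ++ ['[']) []

def altFinish (st : List (List Char) × List Char) : List Char :=
  altOutFold st.1.reverse ++ st.2

def pattern_skeleton_py_alt (raw : String) : String :=
  String.ofList (altFinish (raw.toList.foldl altStep ([], [])))

-- ===== PRECONDITION & SPEC =====
def Spec_pattern_skeleton_py (raw : String) (out : String) : Prop := out = pattern_skeleton_py_alt raw
instance (raw : String) (out : String) : Decidable (Spec_pattern_skeleton_py raw out) := by unfold Spec_pattern_skeleton_py; infer_instance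

-- ===== CLAIM (what is proved, stated in full; the proofs are below) =====
def Claim_equal_pattern_skeleton_py : Prop := ∀ (raw : String), Dom_pattern_skeleton_py raw → Spec_pattern_skeleton_py raw (pattern_skeleton_py raw)

-- ===== LEMMAS AND PROOFS =====

lemma join_init (l : List (List Char)) (init : List Char) :
    l.foldl (fun acc p => acc ++ p) init = init ++ pyJoin l := by
  induction l generalizing init with
  | nil => simp [pyJoin]
  | cons b t ih =>
    simp only [pyJoin, List.foldl_cons, List.nil_append] at *
    rw [ih, ih b]
    simp [List.append_assoc]

lemma pyJoin_append (p q : List (List Char)) : pyJoin (p ++ q) = pyJoin p ++ pyJoin q := by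
  simp only [pyJoin, List.foldl_append]
  rw [join_init q (List.foldl (fun acc p => acc ++ p) [] p)]
  rfl


-- unfolding lemmas for A's loop
lemma skelAux_lit (c : Char) (t : List Char) (parts : List (List Char)) (hc : c ≠ '[') :
    pySkelAux (c :: t) parts = pySkelAux t (parts ++ [[c]]) := by
  simp [pySkelAux, hc]

lemma skelAux_open_none (t : List Char) (parts : List (List Char))
    (hf : pyFindClosing t 0 = none) :
    pySkelAux ('[' :: t) parts = pySkelAux t (parts ++ [['[']]) := by
  simp only [pySkelAux, ne_eq, not_true_eq_false, if_false]
  split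
  · rfl
  · rename_i v h; rw [hf] at h; cases h

lemma skelAux_open_some (t : List Char) (parts : List (List Char)) (v : List Char)
    (hf : pyFindClosing t 0 = some v) :
    pySkelAux ('[' :: t) parts = pySkelAux v (parts ++ [['[', ']']]) := by
  simp only [pySkelAux, ne_eq, not_true_eq_false, if_false]
  split
  · rename_i h; rw [hf] at h; cases h
  · rename_i v' h; rw [hf] at h; cases h; rfl

-- the `parts` accumulator of A's loop only prepends
lemma skelAux_acc : ∀ (n : Nat) (l : List Char), l.length ≤ n →
    ∀ parts, pySkelAux l parts = parts ++ pySkelAux l [] := by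
  intro n
  induction n with
  | zero =>
    intro l hl parts
    have : l = [] := List.eq_nil_of_length_eq_zero (Nat.le_zero.mp hl)
    subst this; simp [pySkelAux]
  | succ n ih =>
    intro l hl parts
    cases l with
    | nil => simp [pySkelAux]
    | cons c t =>
      simp only [List.length_cons, Nat.succ_le_succ_iff] at hl
      by_cases hc : c = '['
      · subst hc
        cases hf : pyFindClosing t 0 with
        | none =>
          rw [skelAux_open_none t parts hf, skelAux_open_none t [] hf,
            ih t hl (parts ++ [['[']]), ih t hl ([] ++ [['[']])]
          simp
        | some v =>
          have hv : v.length ≤ n :=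
            Nat.le_of_lt_succ (Nat.lt_succ_of_lt
              (Nat.lt_of_lt_of_le (pyFindClosing_length t 0 v hf) hl))
          rw [skelAux_open_some t parts v hf, skelAux_open_some t [] v hf,
            ih v hv (parts ++ [['[', ']']]), ih v hv ([] ++ [['[', ']']])]
          simp
      · rw [skelAux_lit c t parts hc, skelAux_lit c t [] hc,
          ih t hl (parts ++ [[c]]), ih t hl ([] ++ [[c]])]
        simp

-- frame lemma: while no depth-0 ']' remains, B never pops below its current stack
lemma alt_frame : ∀ (l : List Char) (stk ext : List (List Char)) (buf : List Char),
    pyFindClosing l stk.length = none →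
    l.foldl altStep (stk ++ ext, buf)
      = ((l.foldl altStep (stk, buf)).1 ++ ext, (l.foldl altStep (stk, buf)).2) := by
  intro l
  induction l with
  | nil => intro stk ext buf _; rfl
  | cons c t ih =>
    intro stk ext buf hf
    simp only [pyFindClosing] at hf
    simp only [List.foldl_cons]
    by_cases h1 : c = '['
    · subst h1
      simp only [altStep, if_true]
      exact ih (buf :: stk) ext [] (by simpa using hf)
    · by_cases h2 : c = ']'
      · subst h2
        simp only [reduceIte] at hf
        cases stk with
        | nil => simp at hf
        | cons b rest =>
          simp only [List.length_cons, Nat.add_eq_zero_iff, one_ne_zero, and_false, if_false,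
            Nat.add_sub_cancel] at hf
          simp only [altStep, List.cons_append, reduceIte]
          exact ih rest ext (b ++ ['[', ']']) hf
      · simp only [if_neg h1, if_neg h2] at hf
        simp only [altStep, if_neg h1, if_neg h2]
        cases stk with
        | nil => exact ih [] ext (buf ++ [c]) hf
        | cons b rest => exact ih (b :: rest) ext (buf ++ [c]) hf

-- close lemma: a matched segment pops back to the saved buffer and appends "[]"
lemma alt_close : ∀ (l : List Char) (pushed stk : List (List Char)) (b0 buf v : List Char),
    pyFindClosing l pushed.length = some v →
    l.foldl altStep (pushed ++ b0 :: stk, buf)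
      = v.foldl altStep (stk, b0 ++ ['[', ']']) := by
  intro l
  induction l with
  | nil => intro pushed stk b0 buf v h; simp [pyFindClosing] at h
  | cons c t ih =>
    intro pushed stk b0 buf v h
    simp only [pyFindClosing] at h
    simp only [List.foldl_cons]
    by_cases h1 : c = '['
    · subst h1
      simp only [if_true] at h ⊢
      simp only [altStep, if_true]
      exact ih (buf :: pushed) stk b0 [] v (by simpa using h)
    · by_cases h2 : c = ']'
      · subst h2
        simp only [reduceIte] at h
        cases pushed with
        | nil =>
          simp only [if_neg h1, List.length_nil, reduceIte, Option.some.injEq] at h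
          subst h
          simp [altStep]
        | cons p ps =>
          simp only [List.length_cons, Nat.add_eq_zero_iff, one_ne_zero, and_false, if_false,
            Nat.add_sub_cancel] at h
          simp only [List.cons_append, altStep, reduceIte]
          exact ih ps stk b0 (p ++ ['[', ']']) v h
      · simp only [if_neg h1, if_neg h2] at h
        simp only [altStep, if_neg h1, if_neg h2]
        cases pushed with
        | nil =>
          simp only [List.nil_append]
          have := ih [] stk b0 (buf ++ [c]) v h
          simpa using this
        | cons p ps =>
          exact ih (p :: ps) stk b0 (buf ++ [c]) v h

-- main invariant: B from an empty stack computes buf ++ A's output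
lemma main_inv : ∀ (n : Nat) (l : List Char), l.length ≤ n → ∀ (buf : List Char),
    altFinish (l.foldl altStep ([], buf)) = buf ++ pyJoin (pySkelAux l []) := by
  intro n
  induction n with
  | zero =>
    intro l hl buf
    have : l = [] := List.eq_nil_of_length_eq_zero (Nat.le_zero.mp hl)
    subst this
    simp [altFinish, altOutFold, pySkelAux, pyJoin]
  | succ n ih =>
    intro l hl buf
    cases l with
    | nil => simp [altFinish, altOutFold, pySkelAux, pyJoin]
    | cons c t =>
      simp only [List.length_cons, Nat.succ_le_succ_iff] at hl
      by_cases h1 : c = '['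
      · subst h1
        cases hf : pyFindClosing t 0 with
        | some v =>
          -- matched bracket: B pops back with "[]", A appends "[]" and continues at v
          have hv : v.length ≤ n :=
            Nat.le_of_lt_succ (Nat.lt_succ_of_lt
              (Nat.lt_of_lt_of_le (pyFindClosing_length t 0 v hf) hl))
          simp only [List.foldl_cons, altStep, if_true]
          have hc := alt_close t [] [] buf [] v (by simpa using hf)
          simp only [List.nil_append] at hc
          rw [hc, ih v hv (buf ++ ['[', ']'])]
          rw [skelAux_open_some t [] v hf, List.nil_append,
            skelAux_acc (n + 1) v (Nat.le_succ_of_le hv) [['[', ']']], pyJoin_append]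
          simp [pyJoin, List.append_assoc]
        | none =>
          -- unmatched '[': B's pushed buffer is never popped; A keeps the literal '['
          simp only [List.foldl_cons, altStep, if_true]
          have hframe := alt_frame t [] [buf] [] (by simpa using hf)
          simp only [List.nil_append] at hframe
          rw [hframe]
          simp only [altFinish, List.reverse_append, List.reverse_cons, List.reverse_nil,
            List.nil_append, List.singleton_append]
          rw [show altOutFold (buf :: (t.foldl altStep ([], [])).1.reverse)
                = (buf ++ ['[']) ++ altOutFold (t.foldl altStep ([], [])).1.reverse from by
              simp [altOutFold]]
          have hih := ih t hl []
          simp only [altFinish, List.nil_append] at hih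
          rw [List.append_assoc, hih,
            skelAux_open_none t [] hf, List.nil_append,
            skelAux_acc (n + 1) t (Nat.le_succ_of_le hl) [['[']], pyJoin_append]
          simp [pyJoin, List.append_assoc]
      · -- literal character (including ']' on an empty stack)
        have hstep : altStep ([], buf) c = ([], buf ++ [c]) := by
          by_cases h2 : c = ']'
          · subst h2; simp [altStep]
          · simp [altStep, h1, h2]
        simp only [List.foldl_cons, hstep]
        rw [ih t hl (buf ++ [c])]
        rw [skelAux_lit c t [] h1, List.nil_append,
          skelAux_acc (n + 1) t (Nat.le_succ_of_le hl) [[c]], pyJoin_append]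
        simp [pyJoin, List.append_assoc]

-- ===== VERDICT (by name: the statement is the Claim_ definition above) =====
theorem pattern_skeleton_py_spec : Claim_equal_pattern_skeleton_py := by
  intro raw _
  unfold Spec_pattern_skeleton_py pattern_skeleton_py pattern_skeleton_py_alt
  have := main_inv raw.toList.length raw.toList (Nat.le_refl _) []
  rw [this]
  simp
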